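-- pv_equiv track=rewrite | github.com/Neehar-konapala/monday-attachment-downloader | monday_item_service.py | _matches_group_flexible
-- ===== SOURCE A (Python) =====
-- def _matches_group_flexible(target_group: str, current_group: str) -> bool:
--     """
--     Flexible group matching using keywords
--     """
--     # For NPOP groups - check LA3 vs LA6
--     if "NPOP" in target_group and "NPOP" in current_group:
--         target_has_la3 = "LA3" in target_group
--         target_has_la6 = "LA6" in target_group
--         current_has_la3 = "LA3" in current_group
--         current_has_la6 = "LA6" in current_group
--
--         if (target_has_la3 and current_has_la3) or (target_has_la6 and current_has_la6):
--             # Check if the second part matches (SOBEYSMIF vs MIFLAOPS)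
--             if "SOBEYSMIF" in target_group and "SOBEYSMIF" in current_group:
--                 return True
--             if "MIFLAOPS" in target_group and "MIFLAOPS" in current_group:
--                 return True
--
--     # For New Tender groups - check region
--     if "New Tender" in target_group and "New Tender" in current_group:
--         regions = ["Atlantic", "West", "Quebec", "Ontario"]
--         for region in regions:
--             if region in target_group and region in current_group:
--                 return True
--
--     # For Pepsi groups
--     if ("Pepsi" in target_group and "Pepsi" in current_group and
--         "Load Tender" in target_group and "Load Tender" in current_group):
--         return True
--
--     return False
-- ===== SOURCE B (Python) =====
-- ALL_KEYS = [
--     ("NPOP", "LA3", "SOBEYSMIF"),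
--     ("NPOP", "LA3", "MIFLAOPS"),
--     ("NPOP", "LA6", "SOBEYSMIF"),
--     ("NPOP", "LA6", "MIFLAOPS"),
--     ("New Tender", "Atlantic"),
--     ("New Tender", "West"),
--     ("New Tender", "Quebec"),
--     ("New Tender", "Ontario"),
--     ("Pepsi", "Load Tender"),
-- ]
--
--
-- def _signature(group):
--     """Canonical match keys a single group name qualifies for, on its own."""
--     return {key for key in ALL_KEYS if all(kw in group for kw in key)}
--
--
-- def _matches_group_flexible(target_group: str, current_group: str) -> bool:
--     """Summarise each group name independently into a signature set of
--     canonical match keys; the groups match iff the signatures intersect."""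
--     return not _signature(target_group).isdisjoint(_signature(current_group))
-- ===== Notes on version B (the rewrite author's own statement) =====
-- stated objective: alternative
-- what changed: Instead of jointly testing keyword pairs against both strings through nested branches, B compiles each group name independently into a signature set of canonical match keys (expanded keyword combinations) and declares a match exactly when the two signature sets intersect.
import Mathlib
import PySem

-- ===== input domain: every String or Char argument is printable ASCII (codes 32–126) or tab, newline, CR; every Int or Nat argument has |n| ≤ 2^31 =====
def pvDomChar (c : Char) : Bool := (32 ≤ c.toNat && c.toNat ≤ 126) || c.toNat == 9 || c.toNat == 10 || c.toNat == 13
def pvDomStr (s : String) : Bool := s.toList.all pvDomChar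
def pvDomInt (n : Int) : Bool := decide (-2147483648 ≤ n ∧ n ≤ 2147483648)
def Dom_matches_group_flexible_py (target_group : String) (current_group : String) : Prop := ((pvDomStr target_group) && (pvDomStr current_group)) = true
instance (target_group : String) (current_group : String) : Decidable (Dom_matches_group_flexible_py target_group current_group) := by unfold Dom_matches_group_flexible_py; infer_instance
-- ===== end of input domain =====

-- B summarises each group name independently into a signature set of canonical match
-- keys and tests the two signature sets for a non-empty intersection (objective: alternative).

-- ===== PORT A =====
-- the Pepsi block + final 'return False' (A's tail after the first two blocks fall through)
def pvA_pepsi (target_group : String) (current_group : String) : Bool :=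
  if (PySem.Str.isIn "Pepsi" target_group && PySem.Str.isIn "Pepsi" current_group) &&
     (PySem.Str.isIn "Load Tender" target_group && PySem.Str.isIn "Load Tender" current_group) then
    true
  else
    false

-- the New Tender block (early-returning for-loop over regions) + the rest of A
def pvA_newTender (target_group : String) (current_group : String) : Bool :=
  if PySem.Str.isIn "New Tender" target_group && PySem.Str.isIn "New Tender" current_group then
    if ["Atlantic", "West", "Quebec", "Ontario"].any
        (fun region => PySem.Str.isIn region target_group && PySem.Str.isIn region current_group) then
      true
    else
      pvA_pepsi target_group current_group
  else
    pvA_pepsi target_group current_group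

def matches_group_flexible_py (target_group : String) (current_group : String) : Bool :=
  if PySem.Str.isIn "NPOP" target_group && PySem.Str.isIn "NPOP" current_group then
    let target_has_la3 := PySem.Str.isIn "LA3" target_group
    let target_has_la6 := PySem.Str.isIn "LA6" target_group
    let current_has_la3 := PySem.Str.isIn "LA3" current_group
    let current_has_la6 := PySem.Str.isIn "LA6" current_group
    if (target_has_la3 && current_has_la3) || (target_has_la6 && current_has_la6) then
      if PySem.Str.isIn "SOBEYSMIF" target_group && PySem.Str.isIn "SOBEYSMIF" current_group then
        true
      else if PySem.Str.isIn "MIFLAOPS" target_group && PySem.Str.isIn "MIFLAOPS" current_group then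
        true
      else
        pvA_newTender target_group current_group
    else
      pvA_newTender target_group current_group
  else
    pvA_newTender target_group current_group

-- ===== PORT B =====
-- Python's variable-length key tuples are ported as List String.
def pvAllKeys : List (List String) :=
  [ ["NPOP", "LA3", "SOBEYSMIF"],
    ["NPOP", "LA3", "MIFLAOPS"],
    ["NPOP", "LA6", "SOBEYSMIF"],
    ["NPOP", "LA6", "MIFLAOPS"],
    ["New Tender", "Atlantic"],
    ["New Tender", "West"],
    ["New Tender", "Quebec"],
    ["New Tender", "Ontario"],
    ["Pepsi", "Load Tender"] ]

-- the set comprehension {key for key in ALL_KEYS if all(kw in group for kw in key)}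
def pvSignature (group : String) : PySem.Set (List String) :=
  PySem.Set.ofList (pvAllKeys.filter (fun key => key.all (fun kw => PySem.Str.isIn kw group)))

def matches_group_flexible_py_alt (target_group : String) (current_group : String) : Bool :=
  !(PySem.Set.isdisjoint (pvSignature target_group) (pvSignature current_group))

-- ===== PRECONDITION & SPEC =====
def Spec_matches_group_flexible_py (target_group : String) (current_group : String) (out : Bool) : Prop := out = matches_group_flexible_py_alt target_group current_group
instance (target_group : String) (current_group : String) (out : Bool) : Decidable (Spec_matches_group_flexible_py target_group current_group out) := by unfold Spec_matches_group_flexible_py; infer_instance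

-- ===== CLAIM (what is proved, stated in full; the proofs are below) =====
def Claim_equal_matches_group_flexible_py : Prop := ∀ (target_group : String) (current_group : String), Dom_matches_group_flexible_py target_group current_group → Spec_matches_group_flexible_py target_group current_group (matches_group_flexible_py target_group current_group)

-- ===== LEMMAS AND PROOFS =====
theorem lemA : ∀ (np la s m R : Bool),
    (if np = true then (if la = true then (if s = true then true else if m = true then true else R) else R) else R)
      = (np && (la && (s || m)) || R) := by decide
theorem lemT : ∀ (nt reg P : Bool),
    (if nt = true then (if reg = true then true else P) else P) = (nt && reg || P) := by decide
theorem lemP : ∀ (pc : Bool), (if pc = true then true else false) = pc := by decide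
theorem blockN : ∀ (tn cn t3 c3 t6 c6 ts cs tm cm : Bool),
    (tn && cn && ((t3 && c3 || t6 && c6) && (ts && cs || tm && cm)))
      = (tn && (t3 && (ts && true)) && (cn && (c3 && (cs && true))) ||
         (tn && (t3 && (tm && true)) && (cn && (c3 && (cm && true))) ||
          (tn && (t6 && (ts && true)) && (cn && (c6 && (cs && true))) ||
           tn && (t6 && (tm && true)) && (cn && (c6 && (cm && true)))))) := by decide
theorem blockT : ∀ (tt2 ct ta ca tw cw tq cq to2 co : Bool),
    (tt2 && ct && (ta && ca || (tw && cw || (tq && cq || (to2 && co || false)))))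
      = (tt2 && (ta && true) && (ct && (ca && true)) ||
         (tt2 && (tw && true) && (ct && (cw && true)) ||
          (tt2 && (tq && true) && (ct && (cq && true)) ||
           tt2 && (to2 && true) && (ct && (co && true))))) := by decide
theorem blockP : ∀ (tp cp tl cl : Bool),
    (tp && cp && (tl && cl)) = (tp && (tl && true) && (cp && (cl && true))) := by decide
theorem pv_key24 (tn cn t3 c3 t6 c6 ts cs tm cm tt2 ct ta ca tw cw tq cq to2 co tp cp tl cl : Bool) :
    (if (tn && cn) = true then
       if (t3 && c3 || t6 && c6) = true then
         if (ts && cs) = true then true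
         else if (tm && cm) = true then true
         else
           if (tt2 && ct) = true then
             if (ta && ca || (tw && cw || (tq && cq || (to2 && co || false)))) = true then true
             else if (tp && cp && (tl && cl)) = true then true else false
           else if (tp && cp && (tl && cl)) = true then true else false
       else
         if (tt2 && ct) = true then
           if (ta && ca || (tw && cw || (tq && cq || (to2 && co || false)))) = true then true
           else if (tp && cp && (tl && cl)) = true then true else false
         else if (tp && cp && (tl && cl)) = true then true else false
     else
       if (tt2 && ct) = true then
         if (ta && ca || (tw && cw || (tq && cq || (to2 && co || false)))) = true then true
         else if (tp && cp && (tl && cl)) = true then true else false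
       else if (tp && cp && (tl && cl)) = true then true else false)
    = (tn && (t3 && (ts && true)) && (cn && (c3 && (cs && true))) ||
       (tn && (t3 && (tm && true)) && (cn && (c3 && (cm && true))) ||
        (tn && (t6 && (ts && true)) && (cn && (c6 && (cs && true))) ||
         (tn && (t6 && (tm && true)) && (cn && (c6 && (cm && true))) ||
          (tt2 && (ta && true) && (ct && (ca && true)) ||
           (tt2 && (tw && true) && (ct && (cw && true)) ||
            (tt2 && (tq && true) && (ct && (cq && true)) ||
             (tt2 && (to2 && true) && (ct && (co && true)) ||
              (tp && (tl && true) && (cp && (cl && true)) || false))))))))) := by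
  rw [lemP (tp && cp && (tl && cl)), lemT, lemA, blockN, blockT, ← blockP]
  simp [Bool.or_assoc, Bool.and_comm, Bool.and_left_comm]

theorem pv_alt_any (t c : String) :
    matches_group_flexible_py_alt t c
      = pvAllKeys.any (fun k => k.all (fun kw => PySem.Str.isIn kw t) && k.all (fun kw => PySem.Str.isIn kw c)) := by
  rw [Bool.eq_iff_iff]
  simp only [matches_group_flexible_py_alt, pvSignature, Bool.not_eq_true', Bool.eq_false_iff, Ne,
    PySem.Set.isdisjoint_iff, PySem.Set.mem_ofList, List.mem_filter, List.any_eq_true,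
    Bool.and_eq_true, not_forall]
  constructor
  · rintro ⟨x, ⟨⟨hx, ht⟩, hc⟩⟩
    rw [not_not] at hc
    exact ⟨x, hx, ht, hc.2⟩
  · rintro ⟨x, hx, ht, hc⟩
    exact ⟨x, ⟨⟨hx, ht⟩, not_not.mpr ⟨hx, hc⟩⟩⟩

-- ===== VERDICT (by name: the statement is the Claim_ definition above) =====
theorem matches_group_flexible_py_spec : Claim_equal_matches_group_flexible_py := by
  intro t c _
  show matches_group_flexible_py t c = matches_group_flexible_py_alt t c
  rw [pv_alt_any]
  simp only [pvAllKeys, List.any_cons, List.any_nil, List.all_cons, List.all_nil,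
    matches_group_flexible_py, pvA_newTender, pvA_pepsi]
  exact pv_key24
    (PySem.Str.isIn "NPOP" t) (PySem.Str.isIn "NPOP" c)
    (PySem.Str.isIn "LA3" t) (PySem.Str.isIn "LA3" c)
    (PySem.Str.isIn "LA6" t) (PySem.Str.isIn "LA6" c)
    (PySem.Str.isIn "SOBEYSMIF" t) (PySem.Str.isIn "SOBEYSMIF" c)
    (PySem.Str.isIn "MIFLAOPS" t) (PySem.Str.isIn "MIFLAOPS" c)
    (PySem.Str.isIn "New Tender" t) (PySem.Str.isIn "New Tender" c)
    (PySem.Str.isIn "Atlantic" t) (PySem.Str.isIn "Atlantic" c)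
    (PySem.Str.isIn "West" t) (PySem.Str.isIn "West" c)
    (PySem.Str.isIn "Quebec" t) (PySem.Str.isIn "Quebec" c)
    (PySem.Str.isIn "Ontario" t) (PySem.Str.isIn "Ontario" c)
    (PySem.Str.isIn "Pepsi" t) (PySem.Str.isIn "Pepsi" c)
    (PySem.Str.isIn "Load Tender" t) (PySem.Str.isIn "Load Tender" c)
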